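-- pv_equiv track=rewrite | github.com/MrBrantCode/unitest_baseline | mut_generate/mist_train_taco/taco_18328/solution.py | count_possible_pins
-- ===== SOURCE A (Python) =====
-- def count_possible_pins(N: int, S: str) -> int:
--     ans = 0
--     for i in range(1000):
--         cnt = 0
--         n = str(i).zfill(3)
--         for c in S:
--             if c == n[cnt]:
--                 cnt += 1
--             if cnt == 3:
--                 ans += 1
--                 break
--     return ans
-- ===== SOURCE B (Python) =====
-- def count_possible_pins(N: int, S: str) -> int:
--     # One left-to-right pass: next-subsequence DP over the 10 digits.
--     # seen1 = digits that occur in the prefix read so far,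
--     # seen2 = ordered digit pairs occurring as a subsequence of it,
--     # seen3 = ordered digit triples (= pins) occurring as a subsequence.
--     seen1 = set()
--     seen2 = set()
--     seen3 = set()
--     for c in S:
--         if c.isdigit():
--             seen3 |= {(a, b, c) for (a, b) in seen2}
--             seen2 |= {(a, c) for a in seen1}
--             seen1.add(c)
--     return len(seen3)
-- ===== Notes on version B (the rewrite author's own statement) =====
-- stated objective: faster
-- what changed: Replaces the 1000-fold rescan of S (one greedy subsequence check per candidate pin) by a single left-to-right pass over S that maintains the sets of digit subsequences of length 1, 2 and 3 of the prefix read so far and returns the size of the length-3 set.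
import Mathlib
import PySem

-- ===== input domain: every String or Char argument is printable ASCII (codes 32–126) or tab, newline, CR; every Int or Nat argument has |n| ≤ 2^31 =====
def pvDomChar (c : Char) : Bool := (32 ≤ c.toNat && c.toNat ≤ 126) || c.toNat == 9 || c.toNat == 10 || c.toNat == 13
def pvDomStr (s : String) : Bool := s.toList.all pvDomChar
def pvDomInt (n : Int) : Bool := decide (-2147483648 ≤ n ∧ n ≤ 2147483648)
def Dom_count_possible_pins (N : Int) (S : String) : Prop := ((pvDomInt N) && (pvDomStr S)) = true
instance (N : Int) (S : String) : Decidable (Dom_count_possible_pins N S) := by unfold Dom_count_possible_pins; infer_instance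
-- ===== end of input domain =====

-- B replaces A's 1000 greedy rescans of S (one per candidate pin) by a single left-to-right
-- pass maintaining the digit subsequences of lengths 1..3 of the prefix (measured faster in a timing run; same exact result, proved below).

-- ===== PORT A =====
-- the inner 'for c in S' loop of A for one pin string n; returns the contribution to ans
-- (1 on 'ans += 1; break', 0 if the loop runs out).  'c == n[cnt]' is ported via pyGet?;
-- cnt is only ever 0,1,2 when n is indexed (the break fires at 3), so the none case is unreachable.
def pvAInner (n : String) : List Char → Int → Int
  | [], _ => 0
  | c :: rest, cnt =>
    let cnt := if PySem.Str.pyGet? n cnt == some c then cnt + 1 else cnt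
    if cnt == 3 then 1 else pvAInner n rest cnt

def count_possible_pins (N : Int) (S : String) : Int :=
  (PySem.List.pyRange 0 1000 1).foldl
    (fun ans i => ans + pvAInner (PySem.Str.zfill (PySem.Int.toStr i) 3) S.toList 0) 0

-- ===== PORT B =====
-- one step of B's loop body: on a digit c, extend seen3 from seen2, seen2 from seen1, add c to seen1
def pvBStep (st : PySem.Set Char × PySem.Set (Char × Char) × PySem.Set (Char × Char × Char))
    (c : Char) :
    PySem.Set Char × PySem.Set (Char × Char) × PySem.Set (Char × Char × Char) :=
  if PySem.Chars.isdigit c then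
    let s3 := PySem.Set.update st.2.2 (st.2.1.map (fun ab => (ab.1, ab.2, c)))
    let s2 := PySem.Set.update st.2.1 (st.1.map (fun a => (a, c)))
    let s1 := PySem.Set.add st.1 c
    (s1, s2, s3)
  else st

def count_possible_pins_alt (N : Int) (S : String) : Int :=
  let st := S.toList.foldl pvBStep ([], [], [])
  (PySem.Set.len st.2.2 : Int)

-- ===== PRECONDITION & SPEC =====
def Spec_count_possible_pins (N : Int) (S : String) (out : Int) : Prop := out = count_possible_pins_alt N S
instance (N : Int) (S : String) (out : Int) : Decidable (Spec_count_possible_pins N S out) := by unfold Spec_count_possible_pins; infer_instance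

-- ===== CLAIM (what is proved, stated in full; the proofs are below) =====
def Claim_equal_count_possible_pins : Prop := ∀ (N : Int) (S : String), Dom_count_possible_pins N S → Spec_count_possible_pins N S (count_possible_pins N S)

-- ===== LEMMAS AND PROOFS =====

def pvD10 : List Char := ['0', '1', '2', '3', '4', '5', '6', '7', '8', '9']

def pvTriples : List (Char × Char × Char) :=
  pvD10.flatMap (fun a => pvD10.flatMap (fun b => pvD10.map (fun c => (a, b, c))))

def pvP (l : List Char) (t : Char × Char × Char) : Bool :=
  decide (([t.1, t.2.1, t.2.2]).Sublist l)

-- A's inner loop is the greedy subsequence matcher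
theorem pvAInner_greedy (a b c : Char) (l : List Char) :
    (pvAInner (String.ofList [a, b, c]) l 0 = if ([a, b, c]).Sublist l then 1 else 0)
    ∧ (pvAInner (String.ofList [a, b, c]) l 1 = if ([b, c]).Sublist l then 1 else 0)
    ∧ (pvAInner (String.ofList [a, b, c]) l 2 = if ([c]).Sublist l then 1 else 0) := by
  induction l with
  | nil => simp [pvAInner]
  | cons x l ih =>
    obtain ⟨ih0, ih1, ih2⟩ := ih
    refine ⟨?_, ?_, ?_⟩
    · rw [pvAInner]
      by_cases hx : a = x
      · subst hx
        simp [PySem.Str.pyGet?, ih1, List.cons_sublist_cons]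
      · have : ([a, b, c]).Sublist (x :: l) ↔ ([a, b, c]).Sublist l := by
          rw [List.sublist_cons_iff]
          constructor
          · rintro (h | ⟨r, hr, _⟩)
            · exact h
            · simp at hr; exact absurd hr.1 hx
          · exact Or.inl
        simp [PySem.Str.pyGet?, hx, ih0, this]
    · rw [pvAInner]
      by_cases hx : b = x
      · subst hx
        simp [PySem.Str.pyGet?, ih2, List.cons_sublist_cons]
      · have : ([b, c]).Sublist (x :: l) ↔ ([b, c]).Sublist l := by
          rw [List.sublist_cons_iff]
          constructor
          · rintro (h | ⟨r, hr, _⟩)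
            · exact h
            · simp at hr; exact absurd hr.1 hx
          · exact Or.inl
        simp [PySem.Str.pyGet?, hx, ih1, this]
    · rw [pvAInner]
      by_cases hx : c = x
      · subst hx
        simp [PySem.Str.pyGet?]
      · have : ([c]).Sublist (x :: l) ↔ ([c]).Sublist l := by
          rw [List.sublist_cons_iff]
          constructor
          · rintro (h | ⟨r, hr, _⟩)
            · exact h
            · simp at hr; exact absurd hr.1 hx
          · exact Or.inl
        simp [PySem.Str.pyGet?, hx, ih2, this]

-- the 1000 pin strings of A's outer loop, as digit triples (concrete computation)
set_option maxRecDepth 10000 in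
set_option maxHeartbeats 4000000 in
theorem pvPins_eq :
    (PySem.List.pyRange 0 1000 1).map (fun i => PySem.Str.zfill (PySem.Int.toStr i) 3)
      = pvTriples.map (fun t => String.ofList [t.1, t.2.1, t.2.2]) := by decide

theorem pvTriples_nodup : pvTriples.Nodup := by
  have h10 : pvD10.Nodup := by decide
  have hprod : pvTriples = pvD10 ×ˢ (pvD10 ×ˢ pvD10) := by
    simp only [pvTriples, SProd.sprod, List.product, List.map_flatMap, List.map_map,
      Function.comp_def]
  rw [hprod]
  exact h10.product (h10.product h10)

theorem pv_isdigit_iff (c : Char) : PySem.Chars.isdigit c = true ↔ c ∈ pvD10 := by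
  unfold PySem.Chars.isdigit
  simp only [Bool.and_eq_true, decide_eq_true_eq]
  constructor
  · rintro ⟨h1, h2⟩
    have h1' : 48 ≤ c.toNat := h1
    have h2' : c.toNat ≤ 57 := h2
    have hc := Char.ofNat_toNat c
    interval_cases h : c.toNat <;> rw [← hc] <;> decide
  · intro h
    fin_cases h <;> exact ⟨by decide, by decide⟩

theorem pvTriples_mem (x y z : Char) :
    (x, y, z) ∈ pvTriples ↔ x ∈ pvD10 ∧ y ∈ pvD10 ∧ z ∈ pvD10 := by
  simp [pvTriples]

-- B's loop invariant
def pvInv (p : List Char)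
    (st : PySem.Set Char × PySem.Set (Char × Char) × PySem.Set (Char × Char × Char)) : Prop :=
  st.1.Nodup ∧ st.2.1.Nodup ∧ st.2.2.Nodup
  ∧ (∀ x, x ∈ st.1 ↔ PySem.Chars.isdigit x ∧ ([x]).Sublist p)
  ∧ (∀ x y, (x, y) ∈ st.2.1 ↔ PySem.Chars.isdigit x ∧ PySem.Chars.isdigit y ∧ ([x, y]).Sublist p)
  ∧ (∀ x y z, (x, y, z) ∈ st.2.2 ↔
      PySem.Chars.isdigit x ∧ PySem.Chars.isdigit y ∧ PySem.Chars.isdigit z ∧ ([x, y, z]).Sublist p)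

theorem pvSnoc (t p : List Char) (c : Char) :
    t.Sublist (p ++ [c]) ↔ t.Sublist p ∨ ∃ t', t = t' ++ [c] ∧ t'.Sublist p := by
  rw [List.sublist_append_iff]
  constructor
  · rintro ⟨l1, l2, rfl, h1, h2⟩
    rcases List.sublist_singleton.mp h2 with rfl | rfl
    · exact Or.inl (by simpa using h1)
    · exact Or.inr ⟨l1, rfl, h1⟩
  · rintro (h | ⟨t', rfl, h⟩)
    · exact ⟨t, [], by simp, h, by simp⟩
    · exact ⟨t', [c], rfl, h, List.Sublist.refl _⟩

theorem pvSnoc1 (x : Char) (p : List Char) (c : Char) :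
    ([x]).Sublist (p ++ [c]) ↔ ([x]).Sublist p ∨ x = c := by
  rw [pvSnoc]
  constructor
  · rintro (h | ⟨t', ht, hs⟩)
    · exact Or.inl h
    · rcases t' with _ | ⟨u, t'⟩ <;> simp_all
  · rintro (h | rfl)
    · exact Or.inl h
    · exact Or.inr ⟨[], rfl, by simp⟩

theorem pvSnoc2 (x y : Char) (p : List Char) (c : Char) :
    ([x, y]).Sublist (p ++ [c]) ↔ ([x, y]).Sublist p ∨ (([x]).Sublist p ∧ y = c) := by
  rw [pvSnoc]
  constructor
  · rintro (h | ⟨t', ht, hs⟩)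
    · exact Or.inl h
    · rcases t' with _ | ⟨u, _ | ⟨v, t'⟩⟩ <;> simp_all
  · rintro (h | ⟨h, rfl⟩)
    · exact Or.inl h
    · exact Or.inr ⟨[x], rfl, h⟩

theorem pvSnoc3 (x y z : Char) (p : List Char) (c : Char) :
    ([x, y, z]).Sublist (p ++ [c]) ↔ ([x, y, z]).Sublist p ∨ (([x, y]).Sublist p ∧ z = c) := by
  rw [pvSnoc]
  constructor
  · rintro (h | ⟨t', ht, hs⟩)
    · exact Or.inl h
    · rcases t' with _ | ⟨u, _ | ⟨v, _ | ⟨w, t'⟩⟩⟩ <;> simp_all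
  · rintro (h | ⟨h, rfl⟩)
    · exact Or.inl h
    · exact Or.inr ⟨[x, y], rfl, h⟩

theorem pvStep_inv (p : List Char) (st) (c : Char) (h : pvInv p st) :
    pvInv (p ++ [c]) (pvBStep st c) := by
  obtain ⟨n1, n2, n3, m1, m2, m3⟩ := h
  by_cases hd : PySem.Chars.isdigit c
  · refine ⟨?_, ?_, ?_, ?_, ?_, ?_⟩ <;> simp only [pvBStep, hd, if_pos]
    · exact PySem.Set.nodup_add st.1 c n1
    · exact PySem.Set.nodup_update _ _ n2
    · exact PySem.Set.nodup_update _ _ n3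
    · intro x
      simp only [PySem.Set.mem_add, pvSnoc1, m1]
      constructor
      · rintro (⟨hx, hs⟩ | rfl) <;> tauto
      · rintro ⟨hx, hs | rfl⟩ <;> tauto
    · intro x y
      simp only [PySem.Set.mem_update, List.mem_map, pvSnoc2, m2, m1, Prod.mk.injEq]
      constructor
      · rintro (⟨hx, hy, hs⟩ | ⟨a, ⟨hda, hsa⟩, rfl, rfl⟩)
        · tauto
        · exact ⟨hda, hd, Or.inr ⟨hsa, rfl⟩⟩
      · rintro ⟨hx, hy, hs | ⟨hs, rfl⟩⟩
        · tauto
        · exact Or.inr ⟨x, ⟨hx, hs⟩, rfl, rfl⟩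
    · intro x y z
      simp only [PySem.Set.mem_update, List.mem_map, pvSnoc3, m3, m2, Prod.mk.injEq]
      constructor
      · rintro (⟨hx, hy, hz, hs⟩ | ⟨⟨a, b⟩, ⟨hda, hdb, hsab⟩, rfl, rfl, rfl⟩)
        · tauto
        · exact ⟨hda, hdb, hd, Or.inr ⟨hsab, rfl⟩⟩
      · rintro ⟨hx, hy, hz, hs | ⟨hs, rfl⟩⟩
        · tauto
        · exact Or.inr ⟨(x, y), ⟨hx, hy, hs⟩, rfl, rfl, rfl⟩
  · have hst : pvBStep st c = st := by simp [pvBStep, hd]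
    rw [hst]
    refine ⟨n1, n2, n3, ?_, ?_, ?_⟩
    · intro x
      rw [m1, pvSnoc1]
      constructor
      · rintro ⟨hx, hs⟩; exact ⟨hx, Or.inl hs⟩
      · rintro ⟨hx, hs | rfl⟩
        · exact ⟨hx, hs⟩
        · exact absurd hx hd
    · intro x y
      rw [m2, pvSnoc2]
      constructor
      · rintro ⟨hx, hy, hs⟩; exact ⟨hx, hy, Or.inl hs⟩
      · rintro ⟨hx, hy, hs | ⟨hs, rfl⟩⟩
        · exact ⟨hx, hy, hs⟩
        · exact absurd hy hd
    · intro x y z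
      rw [m3, pvSnoc3]
      constructor
      · rintro ⟨hx, hy, hz, hs⟩; exact ⟨hx, hy, hz, Or.inl hs⟩
      · rintro ⟨hx, hy, hz, hs | ⟨hs, rfl⟩⟩
        · exact ⟨hx, hy, hz, hs⟩
        · exact absurd hz hd

theorem pvFoldl_inv (rest : List Char) : ∀ p st, pvInv p st →
    pvInv (p ++ rest) (rest.foldl pvBStep st) := by
  induction rest with
  | nil => intro p st h; simpa using h
  | cons c rest ih =>
    intro p st h
    have := ih (p ++ [c]) (pvBStep st c) (pvStep_inv p st c h)
    simpa using this

theorem pvInv_nil : pvInv [] ([], [], []) := by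
  simp [pvInv]

-- A's value is the number of pin triples that are subsequences of S
theorem pvA_eq_countP (N : Int) (S : String) :
    count_possible_pins N S = (pvTriples.countP (pvP S.toList) : Int) := by
  unfold count_possible_pins
  rw [PySem.List.foldl_add (g := fun i => pvAInner (PySem.Str.zfill (PySem.Int.toStr i) 3) S.toList 0)]
  rw [zero_add]
  have hcomp : (fun i => pvAInner (PySem.Str.zfill (PySem.Int.toStr i) 3) S.toList 0)
      = (fun n => pvAInner n S.toList 0) ∘ (fun i => PySem.Str.zfill (PySem.Int.toStr i) 3) := rfl
  rw [hcomp, ← List.map_map, pvPins_eq, List.map_map]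
  have : pvTriples.map ((fun n => pvAInner n S.toList 0) ∘ fun t => String.ofList [t.1, t.2.1, t.2.2])
      = pvTriples.map (fun t => if pvP S.toList t = true then (1 : Int) else 0) := by
    apply List.map_congr_left
    intro t _
    have := (pvAInner_greedy t.1 t.2.1 t.2.2 S.toList).1
    simp only [Function.comp_apply, this, pvP, decide_eq_true_eq]
  rw [this, PySem.List.sum_map_ite_one_zero]

-- B's value is the same count
theorem pvB_eq_countP (N : Int) (S : String) :
    count_possible_pins_alt N S = (pvTriples.countP (pvP S.toList) : Int) := by
  unfold count_possible_pins_alt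
  have inv := pvFoldl_inv S.toList [] ([], [], []) pvInv_nil
  simp only [List.nil_append] at inv
  obtain ⟨-, -, n3, -, -, m3⟩ := inv
  have perm : (S.toList.foldl pvBStep ([], [], [])).2.2.Perm
      (pvTriples.filter (pvP S.toList)) := by
    rw [List.perm_ext_iff_of_nodup n3 (pvTriples_nodup.filter _)]
    rintro ⟨x, y, z⟩
    rw [m3, List.mem_filter, pvTriples_mem]
    simp only [pvP, decide_eq_true_eq, ← pv_isdigit_iff]
    tauto
  have hlen : (S.toList.foldl pvBStep ([], [], [])).2.2.length
      = pvTriples.countP (pvP S.toList) := by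
    rw [perm.length_eq, ← List.countP_eq_length_filter]
  simp only [PySem.Set.len, hlen]

-- ===== VERDICT (by name: the statement is the Claim_ definition above) =====
theorem count_possible_pins_spec : Claim_equal_count_possible_pins := by
  intro N S _
  unfold Spec_count_possible_pins
  rw [pvA_eq_countP, pvB_eq_countP]
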